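-- pv_equiv track=rewrite | github.com/bwanedead/Plattera | backend/alignment/reformatter.py | _create_position_mapping
-- ===== SOURCE A (Python) =====
-- from typing import Dict, List, Any, Tuple, Optional
--
-- def _create_position_mapping(aligned_tokens: List[str],
--                            display_tokens: List[str]) -> Dict[int, Optional[int]]:
--     """Create mapping from alignment positions to display positions."""
--     mapping = {}
--     display_idx = 0
--
--     for align_idx, token in enumerate(aligned_tokens):
--         if token == '-':
--             mapping[align_idx] = None  # Gap has no display position
--         else:
--             if display_idx < len(display_tokens):
--                 mapping[align_idx] = display_idx
--                 display_idx += 1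
--             else:
--                 mapping[align_idx] = None  # No corresponding display token
--
--     return mapping
-- ===== SOURCE B (Python) =====
-- from typing import Dict, List, Optional
--
-- def _create_position_mapping(aligned_tokens: List[str],
--                            display_tokens: List[str]) -> Dict[int, Optional[int]]:
--     """Stateless formulation: collect the (sorted-by-construction) gap positions once;
--     the display index of a non-gap position i is i minus the number of gap positions
--     before i, found by binary search. No running display counter."""
--     gaps = [i for i, t in enumerate(aligned_tokens) if t == '-']
--     limit = len(display_tokens)
--
--     def gaps_before(i):
--         # bisect_left(gaps, i) written out (A's module imports no bisect)
--         lo, hi = 0, len(gaps)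
--         while lo < hi:
--             mid = (lo + hi) // 2
--             if gaps[mid] < i:
--                 lo = mid + 1
--             else:
--                 hi = mid
--         return lo
--
--     return {i: i - gaps_before(i) if t != '-' and i - gaps_before(i) < limit else None
--             for i, t in enumerate(aligned_tokens)}
-- ===== Notes on version B (the rewrite author's own statement) =====
-- stated objective: alternative
-- what changed: B drops A's sequential loop with a mutable running display counter: it collects the gap positions once and then computes each position's display index independently by a closed-form rank, i minus the number of gap positions before i obtained by binary search (hand-written bisect_left), with None for gaps and ranks past len(display_tokens).
import Mathlib
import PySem

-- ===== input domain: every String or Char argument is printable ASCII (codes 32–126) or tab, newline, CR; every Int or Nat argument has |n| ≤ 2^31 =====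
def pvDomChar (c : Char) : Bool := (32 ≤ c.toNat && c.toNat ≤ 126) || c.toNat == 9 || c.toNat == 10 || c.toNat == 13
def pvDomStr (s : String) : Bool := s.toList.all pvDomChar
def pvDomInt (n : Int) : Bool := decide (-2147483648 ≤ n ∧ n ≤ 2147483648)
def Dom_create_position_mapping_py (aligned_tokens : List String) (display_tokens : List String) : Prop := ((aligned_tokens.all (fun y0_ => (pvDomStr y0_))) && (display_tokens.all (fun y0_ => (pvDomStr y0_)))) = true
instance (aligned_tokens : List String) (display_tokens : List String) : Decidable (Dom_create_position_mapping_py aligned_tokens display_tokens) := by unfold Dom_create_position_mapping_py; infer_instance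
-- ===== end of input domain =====

-- B replaces A's sequential loop over a mutable running display counter by a stateless
-- per-position rank: gap positions are collected once and each rank is i minus the number of
-- gaps before i, found by binary search; objective: alternative, same result.

-- ===== PORT A =====
-- one loop step of A: (mapping, display_idx) updated at alignment position p.1 holding token p.2
def pvStepA (L : Int) (s : PySem.Dict Int (Option Int) × Int) (p : Int × String) : PySem.Dict Int (Option Int) × Int :=
  if p.2 == "-" then (s.1.insert p.1 none, s.2)
  else if s.2 < L then (s.1.insert p.1 (some s.2), s.2 + 1)
  else (s.1.insert p.1 none, s.2)

def create_position_mapping_py (aligned_tokens : List String) (display_tokens : List String) : List (Int × Option Int) :=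
  (((PySem.List.enumerate aligned_tokens 0).foldl (pvStepA (display_tokens.length : Int)) (PySem.Dict.empty, 0)).1).items

-- ===== PORT B =====
-- gaps_before(i): hand-written bisect_left over the gap-position list, with fuel = the
-- initial hi (the loop shrinks hi - lo each step, so fuel ≥ hi - lo always suffices);
-- Nat (lo + hi) / 2 is exact for Python's (lo + hi) // 2 on nonnegative ints
def pvGapsBefore (gaps : List Int) (i : Int) : Nat → Nat → Nat → Nat
  | 0, lo, _ => lo
  | fuel + 1, lo, hi =>
    if lo < hi then
      let mid := (lo + hi) / 2
      if PySem.List.pyGetD gaps (mid : Int) 0 < i then pvGapsBefore gaps i fuel (mid + 1) hi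
      else pvGapsBefore gaps i fuel lo mid
    else lo

def create_position_mapping_py_alt (aligned_tokens : List String) (display_tokens : List String) : List (Int × Option Int) :=
  -- gaps = [i for i, t in enumerate(aligned_tokens) if t == '-']
  let gaps : List Int := ((PySem.List.enumerate aligned_tokens 0).filter (fun p => p.2 == "-")).map (·.1)
  let limit : Int := (display_tokens.length : Int)
  let rank : Int → Int := fun i => i - (pvGapsBefore gaps i gaps.length 0 gaps.length : Int)
  -- {i: i - gaps_before(i) if t != '-' and i - gaps_before(i) < limit else None for i, t in enumerate(aligned_tokens)}
  (((PySem.List.enumerate aligned_tokens 0).foldl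
      (fun m p => m.insert p.1
        (if p.2 ≠ "-" ∧ rank p.1 < limit then some (rank p.1) else none))
      PySem.Dict.empty)).items

-- ===== PRECONDITION & SPEC =====
def Spec_create_position_mapping_py (aligned_tokens : List String) (display_tokens : List String) (out : List (Int × Option Int)) : Prop := out = create_position_mapping_py_alt aligned_tokens display_tokens
instance (aligned_tokens : List String) (display_tokens : List String) (out : List (Int × Option Int)) : Decidable (Spec_create_position_mapping_py aligned_tokens display_tokens out) := by unfold Spec_create_position_mapping_py; infer_instance

-- ===== CLAIM (what is proved, stated in full; the proofs are below) =====
def Claim_equal_create_position_mapping_py : Prop := ∀ (aligned_tokens : List String) (display_tokens : List String), Dom_create_position_mapping_py aligned_tokens display_tokens → Spec_create_position_mapping_py aligned_tokens display_tokens (create_position_mapping_py aligned_tokens display_tokens)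

-- ===== LEMMAS AND PROOFS =====

-- The list of (position, value) pairs A's loop appends, processing tokens ts from position k with counter c
def modelA (L : Int) : List String → Int → Int → List (Int × Option Int)
  | [], _, _ => []
  | t :: ts, k, c =>
    if t = "-" then (k, none) :: modelA L ts (k + 1) c
    else if c < L then (k, some c) :: modelA L ts (k + 1) (c + 1)
    else (k, none) :: modelA L ts (k + 1) c

lemma foldA_items (L : Int) : ∀ (ts : List String) (k : Int) (d : PySem.Dict Int (Option Int)) (c : Int),
    (∀ j : Int, k ≤ j → d.contains j = false) →
    (((PySem.List.enumerate ts k).foldl (pvStepA L) (d, c)).1).items = d.items ++ modelA L ts k c := by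
  intro ts
  induction ts with
  | nil => intro k d c _; simp [PySem.List.enumerate_nil, modelA]
  | cons t ts ih =>
    intro k d c hfresh
    have hins : ∀ (v : Option Int) (j : Int), k + 1 ≤ j → (d.insert k v).contains j = false := by
      intro v j hj
      rw [PySem.Dict.contains_insert]
      have : (j == k) = false := by simp; omega
      simp [this, hfresh j (by omega)]
    have hitems : ∀ v : Option Int, (d.insert k v).items = d.items ++ [(k, v)] :=
      fun v => PySem.Dict.items_insert_of_not_contains _ v (hfresh k le_rfl)
    rw [PySem.List.enumerate_cons]
    simp only [List.foldl_cons, pvStepA, modelA]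
    by_cases hgap : t = "-"
    · simp only [hgap]
      simp only [show (("-" : String) == "-") = true from rfl, if_true]
      rw [ih (k + 1) _ c (hins none), hitems]
      simp
    · have hb : (t == "-") = false := by simp [hgap]
      simp only [hb, if_neg hgap, Bool.false_eq_true, if_false]
      by_cases hc : c < L
      · simp only [if_pos hc]
        rw [ih (k + 1) _ (c + 1) (hins (some c)), hitems]
        simp
      · simp only [if_neg hc]
        rw [ih (k + 1) _ c (hins none), hitems]
        simp

-- rank-based value of position j (tokens ts, counter offset c): what modelA records at k + j
def pvVal (L : Int) (ts : List String) (c : Int) (j : Nat) : Option Int :=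
  if ts.getD j "" = "-" then none
  else if c + ((ts.take j).countP (fun t => t != "-") : Int) < L then
    some (c + ((ts.take j).countP (fun t => t != "-") : Int))
  else none

lemma modelA_eq_map (L : Int) : ∀ (ts : List String) (k c : Int), 0 ≤ c →
    modelA L ts k c = (List.range ts.length).map (fun (j : Nat) => ((k + (j : Int) : Int), pvVal L ts c j)) := by
  intro ts
  induction ts with
  | nil => intro k c _; simp [modelA]
  | cons t ts ih =>
    intro k c hc
    have hrange : (List.range (t :: ts).length) = 0 :: (List.range ts.length).map (· + 1) := by
      simp [List.range_succ_eq_map]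
    rw [hrange]
    simp only [List.map_cons, List.map_map, modelA]
    have hsucc : ∀ j : Nat, pvVal L (t :: ts) c (j + 1) =
        pvVal L ts (c + (if t = "-" then 0 else 1)) j := by
      intro j
      simp only [pvVal, List.getD_cons_succ, List.take_succ_cons, List.countP_cons]
      by_cases hg : t = "-"
      · simp [hg]
      · have hb : (t != "-") = true := by simp [hg]
        simp only [hb, if_neg hg, if_true]
        have harith : c + (((ts.take j).countP (fun t => t != "-") + 1 : Nat) : Int)
            = (c + 1) + ((ts.take j).countP (fun t => t != "-") : Int) := by push_cast; ring
        rw [harith]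
    by_cases hg : t = "-"
    · simp only [if_pos hg]
      rw [ih (k + 1) c hc]
      refine List.cons_eq_cons.mpr ⟨by simp [pvVal, hg], ?_⟩
      apply List.map_congr_left
      intro j hj
      simp only [Function.comp_apply]
      rw [hsucc j]
      simp only [if_pos hg, add_zero]
      exact Prod.ext (by push_cast; ring) rfl
    · by_cases hcl : c < L
      · simp only [if_neg hg, if_pos hcl]
        rw [ih (k + 1) (c + 1) (by omega)]
        refine List.cons_eq_cons.mpr ⟨by simp [pvVal, hg, hcl], ?_⟩
        apply List.map_congr_left
        intro j hj
        simp only [Function.comp_apply]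
        rw [hsucc j]
        simp only [if_neg hg]
        exact Prod.ext (by push_cast; ring) rfl
      · simp only [if_neg hg, if_neg hcl]
        rw [ih (k + 1) c hc]
        refine List.cons_eq_cons.mpr ⟨by simp [pvVal, hg, hcl], ?_⟩
        apply List.map_congr_left
        intro j hj
        simp only [Function.comp_apply]
        rw [hsucc j]
        simp only [if_neg hg]
        refine Prod.ext (by push_cast; ring) ?_
        simp only [pvVal]
        have h1 : (0 : Int) ≤ (((ts.take j).countP (fun t => t != "-") : Nat) : Int) := by positivity
        split_ifs <;> first | rfl | omega

-- ===== B-side lemmas =====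

-- the list of gap positions, structurally
def gapsF : List String → Int → List Int
  | [], _ => []
  | t :: ts, k => if t = "-" then k :: gapsF ts (k + 1) else gapsF ts (k + 1)

lemma gaps_eq_gapsF : ∀ (ts : List String) (k : Int),
    ((PySem.List.enumerate ts k).filter (fun p => p.2 == "-")).map (·.1) = gapsF ts k := by
  intro ts
  induction ts with
  | nil => intro k; simp [PySem.List.enumerate_nil, gapsF]
  | cons t ts ih =>
    intro k
    rw [PySem.List.enumerate_cons]
    by_cases hg : t = "-"
    · simp [gapsF, hg, ih]
    · simp [gapsF, hg, ih]

lemma mem_gapsF_lb : ∀ (ts : List String) (k j : Int), j ∈ gapsF ts k → k ≤ j := by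
  intro ts
  induction ts with
  | nil => intro k j h; simp [gapsF] at h
  | cons t ts ih =>
    intro k j h
    simp only [gapsF] at h
    split_ifs at h with hg
    · rcases List.mem_cons.mp h with h | h
      · omega
      · have := ih (k + 1) j h; omega
    · have := ih (k + 1) j h; omega

lemma length_gapsF : ∀ (ts : List String) (k : Int), (gapsF ts k).length = ts.count "-" := by
  intro ts
  induction ts with
  | nil => intro k; simp [gapsF]
  | cons t ts ih =>
    intro k
    by_cases hg : t = "-"
    · simp [gapsF, hg, ih]
    · simp [gapsF, hg, ih]

-- the j-th gap position is < k + m exactly when j < the number of gaps among the first m tokens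
lemma gapsF_get_iff : ∀ (ts : List String) (k : Int) (m j : Nat) (hj : j < (gapsF ts k).length),
    m ≤ ts.length → ((gapsF ts k)[j] < k + (m : Int) ↔ j < (ts.take m).count "-") := by
  intro ts
  induction ts with
  | nil => intro k m j hj; simp [gapsF] at hj
  | cons t ts ih =>
    intro k m j hj hm
    by_cases hg : t = "-"
    · simp only [gapsF, if_pos hg] at hj ⊢
      cases j with
      | zero =>
        cases m with
        | zero => simp
        | succ m' =>
          have : (0 : Nat) < ((t :: ts).take (m' + 1)).count "-" := by
            simp [hg]
          constructor
          · intro _; exact this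
          · intro _
            simp only [List.getElem_cons_zero]
            push_cast; omega
      | succ j' =>
        have hj' : j' < (gapsF ts (k + 1)).length := by simpa using hj
        have hget : (k :: gapsF ts (k + 1))[j' + 1] = (gapsF ts (k + 1))[j'] := by simp
        rw [hget]
        cases m with
        | zero =>
          have hmem : (gapsF ts (k + 1))[j'] ∈ gapsF ts (k + 1) := List.getElem_mem hj'
          have := mem_gapsF_lb ts (k + 1) _ hmem
          simp only [List.take_zero, List.count_nil]
          constructor
          · intro h; push_cast at h; omega
          · intro h; omega
        | succ m' =>
          have h1 : k + ((m' + 1 : Nat) : Int) = (k + 1) + (m' : Int) := by push_cast; ring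
          rw [h1, ih (k + 1) m' j' hj' (by simpa using hm)]
          simp [hg]
    · simp only [gapsF, if_neg hg] at hj ⊢
      cases m with
      | zero =>
        have hmem : (gapsF ts (k + 1))[j] ∈ gapsF ts (k + 1) := List.getElem_mem hj
        have := mem_gapsF_lb ts (k + 1) _ hmem
        simp only [List.take_zero, List.count_nil]
        constructor
        · intro h; push_cast at h; omega
        · intro h; omega
      | succ m' =>
        have h1 : k + ((m' + 1 : Nat) : Int) = (k + 1) + (m' : Int) := by push_cast; ring
        rw [h1, ih (k + 1) m' j hj (by simpa using hm)]
        have : ((t :: ts).take (m' + 1)).count "-" = (ts.take m').count "-" := by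
          simp [hg]
        rw [this]

-- the binary search returns t whenever membership of [j] below the threshold is 'j < t'
lemma pvGapsBefore_eq (gaps : List Int) (i : Int) (t : Nat)
    (hmono : ∀ (j : Nat) (hj : j < gaps.length), gaps[j] < i ↔ j < t) :
    ∀ (fuel lo hi : Nat), hi - lo ≤ fuel → lo ≤ t → t ≤ hi → hi ≤ gaps.length →
      pvGapsBefore gaps i fuel lo hi = t := by
  intro fuel
  induction fuel with
  | zero => intro lo hi hf hlo hhi _; simp only [pvGapsBefore]; omega
  | succ fuel ih =>
    intro lo hi hf hlo hhi hlen
    simp only [pvGapsBefore]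
    by_cases hlh : lo < hi
    · rw [if_pos hlh]
      have hmid1 : (lo + hi) / 2 < hi := by omega
      have hmid0 : lo ≤ (lo + hi) / 2 := by omega
      have hmidlen : (lo + hi) / 2 < gaps.length := by omega
      have hgetd : PySem.List.pyGetD gaps (((lo + hi) / 2 : Nat) : Int) 0
          = gaps[(lo + hi) / 2] := by
        rw [PySem.List.pyGetD_natCast, List.getD_eq_getElem _ _ hmidlen]
      rw [hgetd]
      by_cases hlt : gaps[(lo + hi) / 2] < i
      · rw [if_pos hlt]
        have ht : (lo + hi) / 2 < t := (hmono _ hmidlen).mp hlt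
        exact ih ((lo + hi) / 2 + 1) hi (by omega) (by omega) hhi hlen
      · rw [if_neg hlt]
        have ht : t ≤ (lo + hi) / 2 := by
          by_contra h
          exact hlt ((hmono _ hmidlen).mpr (by omega))
        exact ih lo ((lo + hi) / 2) (by omega) hlo ht (by omega)
    · rw [if_neg hlh]; omega

-- B's rank at a natural position m ≤ length equals the non-gap prefix count
lemma rankB_eq_countP (al : List String) (m : Nat) (hm : m ≤ al.length) :
    (m : Int) - (pvGapsBefore (gapsF al 0) (m : Int) (gapsF al 0).length 0 (gapsF al 0).length : Int)
      = ((al.take m).countP (fun t => t != "-") : Int) := by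
  have hcnt : (al.take m).count "-" ≤ (gapsF al 0).length := by
    rw [length_gapsF]
    exact (List.take_sublist m al).count_le "-"
  have hbis : pvGapsBefore (gapsF al 0) (m : Int) (gapsF al 0).length 0 (gapsF al 0).length
      = (al.take m).count "-" := by
    apply pvGapsBefore_eq (gapsF al 0) (m : Int) _ _ _ 0 (gapsF al 0).length
      (by omega) (by omega) hcnt le_rfl
    intro j hj
    have := gapsF_get_iff al 0 m j hj hm
    rwa [zero_add] at this
  rw [hbis]
  have hlen : (al.take m).length = m := by simp [hm]
  have hsplit : (al.take m).countP (fun t => t != "-") + (al.take m).count "-" = m := by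
    have := List.length_eq_countP_add_countP (p := fun t => t != "-") (l := al.take m)
    rw [hlen] at this
    have hc : (al.take m).countP (fun t => ¬(t != "-") = true) = (al.take m).count "-" := by
      simp [List.count]
      apply List.countP_congr
      intro t _
      by_cases h : t = "-" <;> simp [h]
    omega
  omega

-- ===== VERDICT (by name: the statement is the Claim_ definition above) =====
theorem create_position_mapping_py_spec : Claim_equal_create_position_mapping_py := by
  intro al disp _
  unfold Spec_create_position_mapping_py create_position_mapping_py create_position_mapping_py_alt
  set L := (disp.length : Int) with hLdef
  set n := al.length with hndef
  -- A's items are the modelA list, hence a map over range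
  have hA : (((PySem.List.enumerate al 0).foldl (pvStepA L) (PySem.Dict.empty, 0)).1).items
      = (List.range n).map (fun (j : Nat) => (((0 : Int) + (j : Int) : Int), pvVal L al 0 j)) := by
    rw [foldA_items L al 0 PySem.Dict.empty 0 (fun j _ => PySem.Dict.contains_empty j),
        modelA_eq_map L al 0 0 le_rfl]
    rfl
  rw [hA]
  -- B's gap list
  rw [gaps_eq_gapsF al 0]
  set gaps := gapsF al 0 with hgapsdef
  set rank : Int → Int := fun i => i - (pvGapsBefore gaps i gaps.length 0 gaps.length : Int) with hrankdef
  -- the dict-comprehension fold inserts fresh distinct keys, so items = the mapped list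
  have hfstnd : ((PySem.List.enumerate al 0).map (·.1)).Nodup := by
    rw [PySem.List.map_fst_enumerate]
    simp only [zero_add]
    rw [PySem.List.pyRange_zero_natCast]
    exact (List.nodup_range).map (fun a b => by exact_mod_cast id)
  have hB := PySem.Dict.items_foldl_insert_fresh (PySem.List.enumerate al 0)
    (fun p => p.1)
    (fun p => if p.2 ≠ "-" ∧ rank p.1 < L then some (rank p.1) else none)
    PySem.Dict.empty (fun a _ => PySem.Dict.contains_empty _) hfstnd
  rw [hB, show (PySem.Dict.empty : PySem.Dict Int (Option Int)).items = [] from rfl, List.nil_append]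
  -- rewrite B's enumerate as a map over range n, then compare pointwise
  have henum : PySem.List.enumerate al 0
      = (List.range n).map (fun (j : Nat) => ((j : Int), al.getD j "")) := by
    rw [PySem.List.enumerate_eq_map_pyRange al ""]
    rw [show PySem.List.len al = (n : Int) from rfl, PySem.List.pyRange_zero_natCast]
    rw [List.map_map]
    apply List.map_congr_left
    intro j _
    simp [PySem.List.pyGetD_natCast]
  rw [henum, List.map_map]
  apply List.map_congr_left
  intro m hm
  have hmn : m < n := List.mem_range.mp hm
  simp only [Function.comp_apply]
  refine Prod.ext (by simp) ?_
  -- value at position m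
  have hrk : rank (m : Int) = ((al.take m).countP (fun t => t != "-") : Int) := by
    rw [hrankdef]
    exact rankB_eq_countP al m (by omega)
  rw [hrk]
  simp only [pvVal, zero_add, List.getD_eq_getElem?_getD]
  by_cases hg : al[m]?.getD "" = "-"
  · simp [hg]
  · by_cases hL : ((al.take m).countP (fun t => t != "-") : Int) < L
    · simp [hg, hL]
    · simp [hg, hL]
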